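-- pv_equiv track=rewrite | github.com/panagot/ASI-Agents-Track | agents/symptom_analyzer.py | recommend_specialists
-- ===== SOURCE A (Python) =====
-- from typing import Dict, List, Any
--
-- def recommend_specialists(symptoms: List[str]) -> List[str]:
--     """Recommend specialists based on symptoms"""
--     specialist_mapping = {
--         "cardiologist": ["chest pain", "palpitations", "shortness of breath"],
--         "pulmonologist": ["cough", "wheezing", "breathing problems"],
--         "gastroenterologist": ["abdominal pain", "nausea", "vomiting", "diarrhea"],
--         "neurologist": ["headache", "dizziness", "seizures", "numbness"],
--         "rheumatologist": ["joint pain", "muscle pain", "stiffness"],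
--         "dermatologist": ["rash", "itching", "skin lesions"],
--         "endocrinologist": ["weight changes", "thirst", "fatigue"],
--         "psychiatrist": ["anxiety", "depression", "mood changes"]
--     }
--
--     recommended = []
--     symptoms_lower = [s.lower() for s in symptoms]
--
--     for specialist, related_symptoms in specialist_mapping.items():
--         if any(symptom in symptoms_lower for symptom in related_symptoms):
--             recommended.append(specialist)
--
--     return recommended
-- ===== SOURCE B (Python) =====
-- # Reverse index: symptom -> specialist, built once at module level, plus the
-- # fixed specialist order; one hash lookup per input symptom, then an ordered filter.
-- _INDEX = {
--     "chest pain": "cardiologist", "palpitations": "cardiologist",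
--     "shortness of breath": "cardiologist",
--     "cough": "pulmonologist", "wheezing": "pulmonologist",
--     "breathing problems": "pulmonologist",
--     "abdominal pain": "gastroenterologist", "nausea": "gastroenterologist",
--     "vomiting": "gastroenterologist", "diarrhea": "gastroenterologist",
--     "headache": "neurologist", "dizziness": "neurologist",
--     "seizures": "neurologist", "numbness": "neurologist",
--     "joint pain": "rheumatologist", "muscle pain": "rheumatologist",
--     "stiffness": "rheumatologist",
--     "rash": "dermatologist", "itching": "dermatologist",
--     "skin lesions": "dermatologist",
--     "weight changes": "endocrinologist", "thirst": "endocrinologist",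
--     "fatigue": "endocrinologist",
--     "anxiety": "psychiatrist", "depression": "psychiatrist",
--     "mood changes": "psychiatrist",
-- }
--
-- _ORDER = ["cardiologist", "pulmonologist", "gastroenterologist", "neurologist",
--           "rheumatologist", "dermatologist", "endocrinologist", "psychiatrist"]
--
--
-- def recommend_specialists(symptoms):
--     matched = set()
--     for s in symptoms:
--         spec = _INDEX.get(s.lower())
--         if spec is not None:
--             matched.add(spec)
--     return [sp for sp in _ORDER if sp in matched]
-- ===== Notes on version B (the rewrite author's own statement) =====
-- stated objective: faster
-- what changed: Replaces A's per-specialist scan (each of the 26 mapping symptoms membership-tested against the lowered input list) with a flat reverse symptom-to-specialist dict literal, a single hash-lookup pass over the inputs collecting a matched set, and a final ordered filter of the fixed specialist list.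
import Mathlib
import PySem

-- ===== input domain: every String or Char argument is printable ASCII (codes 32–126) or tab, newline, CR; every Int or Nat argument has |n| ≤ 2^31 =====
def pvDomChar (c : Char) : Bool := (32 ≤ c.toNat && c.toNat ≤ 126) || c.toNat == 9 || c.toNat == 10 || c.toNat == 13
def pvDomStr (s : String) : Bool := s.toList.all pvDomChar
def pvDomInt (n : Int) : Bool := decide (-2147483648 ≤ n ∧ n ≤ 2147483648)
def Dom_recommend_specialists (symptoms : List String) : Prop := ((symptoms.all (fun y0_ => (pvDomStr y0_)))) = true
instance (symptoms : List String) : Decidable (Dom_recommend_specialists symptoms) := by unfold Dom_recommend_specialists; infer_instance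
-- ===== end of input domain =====

-- B replaces A's per-specialist membership scans with a flat reverse symptom→specialist
-- dict literal, one lookup pass over the inputs into a matched set, and an ordered
-- filter of the fixed specialist list; same output, one hash lookup per input symptom.

-- ===== PORT A =====
-- A's module literal: specialist → related symptoms, in A's insertion order
def pvMapping : List (String × List String) :=
  [("cardiologist", ["chest pain", "palpitations", "shortness of breath"]),
   ("pulmonologist", ["cough", "wheezing", "breathing problems"]),
   ("gastroenterologist", ["abdominal pain", "nausea", "vomiting", "diarrhea"]),
   ("neurologist", ["headache", "dizziness", "seizures", "numbness"]),
   ("rheumatologist", ["joint pain", "muscle pain", "stiffness"]),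
   ("dermatologist", ["rash", "itching", "skin lesions"]),
   ("endocrinologist", ["weight changes", "thirst", "fatigue"]),
   ("psychiatrist", ["anxiety", "depression", "mood changes"])]

def recommend_specialists (symptoms : List String) : List String :=
  let symptoms_lower := symptoms.map PySem.Str.lower
  pvMapping.foldl
    (fun recommended p =>
      if p.2.any (fun symptom => symptoms_lower.contains symptom) then
        recommended ++ [p.1]
      else recommended)
    []

-- ===== PORT B =====
-- B's flat dict literal _INDEX: symptom → specialist
def pvRevIndex : PySem.Dict String String := PySem.Dict.ofList
  [("chest pain", "cardiologist"), ("palpitations", "cardiologist"),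
   ("shortness of breath", "cardiologist"),
   ("cough", "pulmonologist"), ("wheezing", "pulmonologist"),
   ("breathing problems", "pulmonologist"),
   ("abdominal pain", "gastroenterologist"), ("nausea", "gastroenterologist"),
   ("vomiting", "gastroenterologist"), ("diarrhea", "gastroenterologist"),
   ("headache", "neurologist"), ("dizziness", "neurologist"),
   ("seizures", "neurologist"), ("numbness", "neurologist"),
   ("joint pain", "rheumatologist"), ("muscle pain", "rheumatologist"),
   ("stiffness", "rheumatologist"),
   ("rash", "dermatologist"), ("itching", "dermatologist"),
   ("skin lesions", "dermatologist"),
   ("weight changes", "endocrinologist"), ("thirst", "endocrinologist"),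
   ("fatigue", "endocrinologist"),
   ("anxiety", "psychiatrist"), ("depression", "psychiatrist"),
   ("mood changes", "psychiatrist")]

-- B's _ORDER literal
def pvOrder : List String :=
  ["cardiologist", "pulmonologist", "gastroenterologist", "neurologist",
   "rheumatologist", "dermatologist", "endocrinologist", "psychiatrist"]

-- B's loop: for s in symptoms: spec = _INDEX.get(s.lower()); if spec is not None: matched.add(spec)
def pvCollect : List String → PySem.Set String → PySem.Set String
  | [], matched => matched
  | s :: rest, matched =>
    match pvRevIndex.get? (PySem.Str.lower s) with
    | some spec => pvCollect rest (PySem.Set.add matched spec)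
    | none => pvCollect rest matched

def recommend_specialists_alt (symptoms : List String) : List String :=
  pvOrder.filter (fun sp => PySem.Set.contains (pvCollect symptoms PySem.Set.empty) sp)

-- ===== PRECONDITION & SPEC =====
def Spec_recommend_specialists (symptoms : List String) (out : List String) : Prop := out = recommend_specialists_alt symptoms
instance (symptoms : List String) (out : List String) : Decidable (Spec_recommend_specialists symptoms out) := by unfold Spec_recommend_specialists; infer_instance

-- ===== CLAIM =====
def Claim_equal_recommend_specialists : Prop := ∀ (symptoms : List String), Dom_recommend_specialists symptoms → Spec_recommend_specialists symptoms (recommend_specialists symptoms)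

-- ===== LEMMAS AND PROOFS =====

-- a lookup in B's reverse index is exactly membership of some related-symptom list of A's mapping
theorem pvRevIndex_get (x sp : String) :
    pvRevIndex.get? x = some sp ↔ ∃ L, (sp, L) ∈ pvMapping ∧ x ∈ L := by
  rw [PySem.Dict.get?_eq_some_iff_mem_items pvRevIndex x sp (by decide)]
  show (x, sp) ∈ PySem.Dict.items pvRevIndex ↔ _
  have hitems : PySem.Dict.items pvRevIndex =
      [("chest pain", "cardiologist"), ("palpitations", "cardiologist"),
       ("shortness of breath", "cardiologist"), ("cough", "pulmonologist"),
       ("wheezing", "pulmonologist"), ("breathing problems", "pulmonologist"),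
       ("abdominal pain", "gastroenterologist"), ("nausea", "gastroenterologist"),
       ("vomiting", "gastroenterologist"), ("diarrhea", "gastroenterologist"),
       ("headache", "neurologist"), ("dizziness", "neurologist"), ("seizures", "neurologist"),
       ("numbness", "neurologist"), ("joint pain", "rheumatologist"),
       ("muscle pain", "rheumatologist"), ("stiffness", "rheumatologist"),
       ("rash", "dermatologist"), ("itching", "dermatologist"), ("skin lesions", "dermatologist"),
       ("weight changes", "endocrinologist"), ("thirst", "endocrinologist"),
       ("fatigue", "endocrinologist"), ("anxiety", "psychiatrist"),
       ("depression", "psychiatrist"), ("mood changes", "psychiatrist")] := by decide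
  rw [hitems]
  simp only [pvMapping, List.mem_cons, List.not_mem_nil, or_false, Prod.mk.injEq]
  constructor
  · rintro (h | h | h | h | h | h | h | h | h | h | h | h | h |
      h | h | h | h | h | h | h | h | h | h | h | h | h) <;>
      (obtain ⟨rfl, rfl⟩ := h) <;> simp
  · rintro ⟨L, hL, hx⟩
    rcases hL with ⟨h1, h2⟩ | ⟨h1, h2⟩ | ⟨h1, h2⟩ | ⟨h1, h2⟩ | ⟨h1, h2⟩ | ⟨h1, h2⟩ |
      ⟨h1, h2⟩ | ⟨h1, h2⟩ <;> subst h1 <;> subst h2 <;> simp_all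

-- membership in B's matched set after the lookup pass
theorem mem_pvCollect (symptoms : List String) (st : PySem.Set String) (sp : String) :
    sp ∈ pvCollect symptoms st ↔
      sp ∈ st ∨ ∃ s ∈ symptoms, pvRevIndex.get? (PySem.Str.lower s) = some sp := by
  induction symptoms generalizing st with
  | nil => simp [pvCollect]
  | cons a l ih =>
    simp only [pvCollect, List.mem_cons]
    cases h : pvRevIndex.get? (PySem.Str.lower a) with
    | none =>
      rw [ih]
      constructor
      · rintro (hs | hs); · exact Or.inl hs
        · obtain ⟨s, h1, h2⟩ := hs; exact Or.inr ⟨s, Or.inr h1, h2⟩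
      · rintro (hs | ⟨s, hsl, hget⟩); · exact Or.inl hs
        · rcases hsl with rfl | hsl
          · rw [h] at hget; cases hget
          · exact Or.inr ⟨s, hsl, hget⟩
    | some spec =>
      rw [ih]
      simp only [PySem.Set.mem_add]
      constructor
      · rintro ((hs | rfl) | hs)
        · exact Or.inl hs
        · exact Or.inr ⟨a, Or.inl rfl, h⟩
        · obtain ⟨s, h1, h2⟩ := hs; exact Or.inr ⟨s, Or.inr h1, h2⟩
      · rintro (hs | ⟨s, hsl, hget⟩); · exact Or.inl (Or.inl hs)
        · rcases hsl with rfl | hsl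
          · rw [h] at hget; injection hget with hg; exact Or.inl (Or.inr hg.symm)
          · exact Or.inr ⟨s, hsl, hget⟩

-- B's _ORDER list is exactly the key sequence of A's mapping
theorem pvOrder_eq : pvOrder = pvMapping.map Prod.fst := by decide

-- ===== VERDICT =====
theorem recommend_specialists_spec : Claim_equal_recommend_specialists := by
  intro symptoms _
  show recommend_specialists symptoms = recommend_specialists_alt symptoms
  unfold recommend_specialists recommend_specialists_alt
  rw [PySem.List.foldl_append_if, List.nil_append, pvOrder_eq, List.filter_map]
  congr 1
  apply List.filter_congr
  intro p hp
  rw [Bool.eq_iff_iff]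
  simp only [Function.comp, List.any_eq_true, List.contains_iff_mem, List.mem_map,
    PySem.Set.contains_iff, mem_pvCollect, PySem.Set.empty, List.not_mem_nil, false_or,
    pvRevIndex_get]
  constructor
  · rintro ⟨sym, hsymL, s, hs, rfl⟩
    exact ⟨s, hs, p.2, hp, hsymL⟩
  · rintro ⟨s, hs, L, hL, hx⟩
    have : L = p.2 := by
      simp only [pvMapping, List.mem_cons, List.not_mem_nil, or_false] at hp
      rcases hp with rfl | rfl | rfl | rfl | rfl | rfl | rfl | rfl <;>
        simp only [pvMapping, List.mem_cons, List.not_mem_nil, or_false, Prod.mk.injEq] at hL <;>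
        simp_all
    subst this
    exact ⟨PySem.Str.lower s, hx, s, hs, rfl⟩
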